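-- pv_equiv track=rewrite | github.com/gramaziokohler/compas_timber | src/compas_timber/utils/__init__.py | _split_into_consecutive_sequences
-- ===== SOURCE A (Python) =====
-- def _split_into_consecutive_sequences(source, wrap_on):
--     # type: (list[int], int) -> list[list[int]]
--     if not source:
--         return []
--
--     sequences = []
--     current_sequence = [source[0]]
--
--     for i in range(1, len(source)):
--         curr_val = source[i]
--         prev_incremented = (source[i - 1] + 1) % wrap_on
--         if curr_val == prev_incremented:
--             current_sequence.append(curr_val)
--         else:
--             sequences.append(current_sequence)
--             current_sequence = [curr_val]
--
--     sequences.append(current_sequence)  # add the last sequence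
--     return sequences
-- ===== SOURCE B (Python) =====
-- def _split_into_consecutive_sequences(source, wrap_on):
--     # type: (list[int], int) -> list[list[int]]
--     # Two-phase: locate break indices first, then slice between consecutive cut points.
--     if not source:
--         return []
--     breaks = [i for i in range(1, len(source)) if source[i] != (source[i - 1] + 1) % wrap_on]
--     cuts = [0] + breaks + [len(source)]
--     return [source[a:b] for a, b in zip(cuts, cuts[1:])]
-- ===== Notes on version B (the rewrite author's own statement) =====
-- stated objective: alternative
-- what changed: Instead of accumulating element-by-element into a current-sequence buffer, B first computes the list of break indices with one comprehension and then partitions the list by slicing between consecutive cut points.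
import Mathlib
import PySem

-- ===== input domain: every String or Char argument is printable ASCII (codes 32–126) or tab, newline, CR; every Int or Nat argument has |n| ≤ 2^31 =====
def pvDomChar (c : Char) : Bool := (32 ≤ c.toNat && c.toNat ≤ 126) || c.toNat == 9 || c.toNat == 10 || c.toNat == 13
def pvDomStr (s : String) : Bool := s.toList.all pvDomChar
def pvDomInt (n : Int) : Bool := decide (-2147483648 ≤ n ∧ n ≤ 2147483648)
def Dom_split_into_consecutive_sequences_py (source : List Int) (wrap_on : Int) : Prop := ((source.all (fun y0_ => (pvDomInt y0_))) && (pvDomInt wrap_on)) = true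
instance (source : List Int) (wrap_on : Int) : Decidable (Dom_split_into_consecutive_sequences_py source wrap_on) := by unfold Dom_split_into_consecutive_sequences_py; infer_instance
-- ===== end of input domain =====

-- B locates the break indices first and then slices the list between consecutive cut
-- points, instead of A's element-by-element accumulation into a current-sequence buffer
-- (objective: alternative decomposition, same O(n) cost).

-- ===== PORT A =====
def split_into_consecutive_sequences_py (source : List Int) (wrap_on : Int) : List (List Int) :=
  match source with
  | [] => []
  | s0 :: _ =>
    let st := (PySem.List.pyRange 1 (source.length : Int) 1).foldl
      (fun (st : List (List Int) × List Int) i =>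
        let curr_val := PySem.List.pyGetD source i 0
        let prev_incremented := PySem.Int.mod (PySem.List.pyGetD source (i - 1) 0 + 1) wrap_on
        if curr_val = prev_incremented then (st.1, st.2 ++ [curr_val])
        else (st.1 ++ [st.2], [curr_val]))
      (([], [s0]) : List (List Int) × List Int)
    st.1 ++ [st.2]


-- ===== PORT B =====
def split_into_consecutive_sequences_py_alt (source : List Int) (wrap_on : Int) : List (List Int) :=
  if source = [] then []
  else
    let breaks := (PySem.List.pyRange 1 (source.length : Int) 1).filter
      (fun i => decide (PySem.List.pyGetD source i 0 ≠ PySem.Int.mod (PySem.List.pyGetD source (i - 1) 0 + 1) wrap_on))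
    let cuts := 0 :: (breaks ++ [(source.length : Int)])
    (cuts.zip cuts.tail).map (fun p => PySem.List.slice source (some p.1) (some p.2))


-- ===== PRECONDITION & SPEC =====
-- Pre_ excludes wrap_on = 0 with two or more elements, where Python's `% wrap_on` raises ZeroDivisionError (in A and in B alike).
def Pre_split_into_consecutive_sequences_py (source : List Int) (wrap_on : Int) : Prop :=
  source.length ≤ 1 ∨ wrap_on ≠ 0
instance (source : List Int) (wrap_on : Int) : Decidable (Pre_split_into_consecutive_sequences_py source wrap_on) := by unfold Pre_split_into_consecutive_sequences_py; infer_instance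
def pvWitness_split_into_consecutive_sequences_py : List Int × Int := ([1, 2, 3, 5, 6], 10)

def Spec_split_into_consecutive_sequences_py (source : List Int) (wrap_on : Int) (out : List (List Int)) : Prop := out = split_into_consecutive_sequences_py_alt source wrap_on
instance (source : List Int) (wrap_on : Int) (out : List (List Int)) : Decidable (Spec_split_into_consecutive_sequences_py source wrap_on out) := by unfold Spec_split_into_consecutive_sequences_py; infer_instance

-- ===== CLAIM (what is proved, stated in full; the proofs are below) =====
def Claim_equal_split_into_consecutive_sequences_py : Prop := ∀ (source : List Int) (wrap_on : Int), Dom_split_into_consecutive_sequences_py source wrap_on → Pre_split_into_consecutive_sequences_py source wrap_on → Spec_split_into_consecutive_sequences_py source wrap_on (split_into_consecutive_sequences_py source wrap_on)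

-- ===== LEMMAS AND PROOFS =====
def pvCont (w x y : Int) : Bool := decide (y = PySem.Int.mod (x + 1) w)
def pvStepF (w : Int) (st : List (List Int) × List Int) (p : Int × Int) : List (List Int) × List Int :=
  if p.2 = PySem.Int.mod (p.1 + 1) w then (st.1, st.2 ++ [p.2]) else (st.1 ++ [st.2], [p.2])
def pvRunsAux (w x : Int) : List Int → List Int × List (List Int)
  | [] => ([], [])
  | y :: t =>
    let r := pvRunsAux w y t
    if pvCont w x y then (y :: r.1, r.2) else ([], (y :: r.1) :: r.2)
def pvSl (xs : List Int) (p : Nat × Nat) : List Int := (xs.drop p.1).take (p.2 - p.1)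
def pvPairsN {α : Type} (l : List α) : List (α × α) := l.zip l.tail
def pvFNat (w : Int) (xs : List Int) : List Nat :=
  ((List.range (xs.length - 1)).filter (fun k => !pvCont w (xs.getD k 0) (xs.getD (k + 1) 0))).map (fun k => k + 1)

lemma pvMapNatPairs : ∀ (t : List Int) (x : Int),
    (List.range t.length).map (fun k => ((x :: t).getD k 0, (x :: t).getD (k + 1) 0)) = (x :: t).zip t := by
  intro t
  induction t with
  | nil => intro x; simp
  | cons y t' ih =>
    intro x
    rw [List.length_cons, List.range_succ_eq_map, List.map_cons, List.map_map]
    simp only [List.getD_cons_zero, List.getD_cons_succ]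
    have h : ((fun k => ((x :: y :: t').getD k 0, (y :: t').getD k 0)) ∘ Nat.succ)
        = (fun k => ((y :: t').getD k 0, (y :: t').getD (k + 1) 0)) := by
      funext k; simp
    rw [h, ih y]
    simp [List.zip]

lemma pvLoopA (w : Int) : ∀ (t : List Int) (x : Int) (acc : List (List Int)) (cur : List Int),
    (((x :: t).zip t).foldl (pvStepF w) (acc, cur)).1 ++ [(((x :: t).zip t).foldl (pvStepF w) (acc, cur)).2]
      = acc ++ (cur ++ (pvRunsAux w x t).1) :: (pvRunsAux w x t).2 := by
  intro t
  induction t with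
  | nil => intro x acc cur; simp [pvRunsAux]
  | cons y t' ih =>
    intro x acc cur
    simp only [List.zip_cons_cons, List.foldl_cons, pvRunsAux]
    by_cases h : pvCont w x y
    · have h' : y = PySem.Int.mod (x + 1) w := by simpa [pvCont] using h
      simp only [h, if_pos h', pvStepF]
      rw [ih y acc (cur ++ [y])]
      simp
    · have h' : ¬ y = PySem.Int.mod (x + 1) w := by simpa [pvCont] using h
      simp only [h, if_neg h', pvStepF]
      rw [ih y (acc ++ [cur]) [y]]
      simp

lemma pvShift (x : Int) (xs : List Int) : ∀ (L : List Nat),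
    (pvPairsN (L.map (fun j => j + 1))).map (pvSl (x :: xs)) = (pvPairsN L).map (pvSl xs) := by
  intro L
  have hz : pvPairsN (L.map (fun j => j + 1)) = (pvPairsN L).map (Prod.map (·+1) (·+1)) := by
    unfold pvPairsN
    rw [← List.map_tail, List.zip_map]
  rw [hz, List.map_map]
  apply List.map_congr_left
  intro p _
  simp [pvSl, Prod.map, List.drop_succ_cons]

lemma pvFcons (w x y : Int) (t : List Int) :
    pvFNat w (x :: y :: t) = (if pvCont w x y then [] else [1]) ++ (pvFNat w (y :: t)).map (fun j => j + 1) := by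
  unfold pvFNat
  simp only [List.length_cons, Nat.add_sub_cancel, List.range_succ_eq_map, List.filter_cons,
    List.getD_cons_zero, List.getD_cons_succ, List.filter_map]
  have h : ((fun k => !pvCont w ((x :: y :: t).getD k 0) ((y :: t).getD k 0)) ∘ Nat.succ)
      = (fun k => !pvCont w ((y :: t).getD k 0) ((y :: t).getD (k + 1) 0)) := by
    funext k; simp
  rw [h]
  by_cases hc : pvCont w x y
  · simp [hc, List.map_map]
  · simp [hc, List.map_map]

lemma pvPairsN_cons {α : Type} (a b : α) (R : List α) : pvPairsN (a :: b :: R) = (a, b) :: pvPairsN (b :: R) := rfl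

lemma pvPyPairs (t : List Int) (x : Int) :
    (PySem.List.pyRange 1 (((x :: t).length : Nat) : Int) 1).map
      (fun i => (PySem.List.pyGetD (x :: t) (i - 1) 0, PySem.List.pyGetD (x :: t) i 0)) = (x :: t).zip t := by
  rw [PySem.List.pyRange_one, List.map_map]
  have hn : ((((x :: t).length : Nat) : Int) - 1).toNat = t.length := by simp
  rw [hn]
  have h : ((fun i => (PySem.List.pyGetD (x :: t) (i - 1) 0, PySem.List.pyGetD (x :: t) i 0)) ∘ (fun k : Nat => (1 : Int) + (k : Int)))
      = fun k : Nat => ((x :: t).getD k 0, (x :: t).getD (k + 1) 0) := by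
    funext k
    have h1 : (1 : Int) + (k : Int) - 1 = ((k : Nat) : Int) := by ring
    have h2 : (1 : Int) + (k : Int) = (((k + 1 : Nat)) : Int) := by push_cast; ring
    simp only [Function.comp]
    rw [h1, h2]
    simp only [PySem.List.pyGetD_natCast]
  rw [h, pvMapNatPairs]

lemma pvSBmain (w : Int) : ∀ (t : List Int) (x : Int),
    (pvPairsN (0 :: (pvFNat w (x :: t) ++ [(x :: t).length]))).map (pvSl (x :: t))
      = (x :: (pvRunsAux w x t).1) :: (pvRunsAux w x t).2 := by
  intro t
  induction t with
  | nil => intro x; simp [pvFNat, pvPairsN, pvSl, pvRunsAux]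
  | cons y t' ih =>
    intro x
    obtain ⟨l₀, L', hL⟩ : ∃ l₀ L', pvFNat w (y :: t') ++ [(y :: t').length] = l₀ :: L' := by
      cases pvFNat w (y :: t') with
      | nil => exact ⟨_, _, rfl⟩
      | cons a l => exact ⟨_, _, rfl⟩
    have ihx := ih y
    rw [hL] at ihx
    have hcuts : pvFNat w (x :: y :: t') ++ [(x :: y :: t').length]
        = (if pvCont w x y then [] else [1]) ++ (l₀ + 1) :: L'.map (fun j => j + 1) := by
      rw [pvFcons, List.append_assoc]
      congr 1
      have hmap : (pvFNat w (y :: t')).map (fun j => j + 1) ++ [(x :: y :: t').length]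
          = (pvFNat w (y :: t') ++ [(y :: t').length]).map (fun j => j + 1) := by
        simp
      rw [hmap, hL, List.map_cons]
    by_cases hc : pvCont w x y
    · rw [pvPairsN_cons, List.map_cons] at ihx
      injection ihx with h1 h2
      rw [hcuts, if_pos hc, List.nil_append, pvPairsN_cons, List.map_cons]
      have hhead : pvSl (x :: y :: t') (0, l₀ + 1) = x :: pvSl (y :: t') (0, l₀) := by
        simp [pvSl]
      have htail : (pvPairsN ((l₀ + 1) :: L'.map (fun j => j + 1))).map (pvSl (x :: y :: t'))
          = (pvPairsN (l₀ :: L')).map (pvSl (y :: t')) := by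
        have h3 : (l₀ + 1) :: L'.map (fun j => j + 1) = (l₀ :: L').map (fun j => j + 1) := by simp
        rw [h3, pvShift]
      rw [hhead, htail, h1, h2]
      simp [pvRunsAux, hc]
    · rw [hcuts, if_neg hc,
        show ([1] ++ (l₀ + 1) :: L'.map (fun j => j + 1) : List Nat) = 1 :: (l₀ + 1) :: L'.map (fun j => j + 1) from rfl,
        pvPairsN_cons, List.map_cons]
      have htail : (pvPairsN (1 :: (l₀ + 1) :: L'.map (fun j => j + 1))).map (pvSl (x :: y :: t'))
          = (pvPairsN (0 :: l₀ :: L')).map (pvSl (y :: t')) := by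
        have h3 : (1 : Nat) :: (l₀ + 1) :: L'.map (fun j => j + 1) = ((0 : Nat) :: l₀ :: L').map (fun j => j + 1) := by simp
        rw [h3, pvShift]
      have hhead : pvSl (x :: y :: t') (0, 1) = [x] := by simp [pvSl]
      rw [htail, ihx, hhead]
      simp [pvRunsAux, hc]

lemma pvA_eq (w : Int) (x : Int) (t : List Int) :
    split_into_consecutive_sequences_py (x :: t) w
      = (x :: (pvRunsAux w x t).1) :: (pvRunsAux w x t).2 := by
  have key : (PySem.List.pyRange 1 (((x :: t).length : Nat) : Int) 1).foldl
      (fun (st : List (List Int) × List Int) i =>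
        let curr_val := PySem.List.pyGetD (x :: t) i 0
        let prev_incremented := PySem.Int.mod (PySem.List.pyGetD (x :: t) (i - 1) 0 + 1) w
        if curr_val = prev_incremented then (st.1, st.2 ++ [curr_val])
        else (st.1 ++ [st.2], [curr_val])) ([], [x])
      = ((x :: t).zip t).foldl (pvStepF w) ([], [x]) := by
    rw [← pvPyPairs t x, List.foldl_map]
    rfl
  show ((PySem.List.pyRange 1 (((x :: t).length : Nat) : Int) 1).foldl _ ([], [x])).1
      ++ [((PySem.List.pyRange 1 (((x :: t).length : Nat) : Int) 1).foldl _ ([], [x])).2] = _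
  rw [key, pvLoopA w t x [] [x]]
  simp

lemma pvB_eq (w : Int) (x : Int) (t : List Int) :
    split_into_consecutive_sequences_py_alt (x :: t) w
      = (pvPairsN (0 :: (pvFNat w (x :: t) ++ [(x :: t).length]))).map (pvSl (x :: t)) := by
  unfold split_into_consecutive_sequences_py_alt
  rw [if_neg (List.cons_ne_nil x t)]
  have hbr : (PySem.List.pyRange 1 (((x :: t).length : Nat) : Int) 1).filter
      (fun i => decide (PySem.List.pyGetD (x :: t) i 0 ≠ PySem.Int.mod (PySem.List.pyGetD (x :: t) (i - 1) 0 + 1) w))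
      = (pvFNat w (x :: t)).map (fun j : Nat => (j : Int)) := by
    rw [PySem.List.pyRange_one]
    have hn : ((((x :: t).length : Nat) : Int) - 1).toNat = t.length := by simp
    rw [hn, List.filter_map]
    have hp : ((fun i => decide (PySem.List.pyGetD (x :: t) i 0 ≠ PySem.Int.mod (PySem.List.pyGetD (x :: t) (i - 1) 0 + 1) w)) ∘ (fun k : Nat => (1 : Int) + (k : Int)))
        = fun k : Nat => !pvCont w ((x :: t).getD k 0) ((x :: t).getD (k + 1) 0) := by
      funext k
      have h1 : (1 : Int) + (k : Int) - 1 = ((k : Nat) : Int) := by ring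
      have h2 : (1 : Int) + (k : Int) = (((k + 1 : Nat)) : Int) := by push_cast; ring
      simp only [Function.comp]
      rw [h1]
      simp only [h2]
      rw [PySem.List.pyGetD_natCast, PySem.List.pyGetD_natCast]
      simp [pvCont, decide_not]
    rw [hp]
    unfold pvFNat
    rw [List.length_cons, Nat.add_sub_cancel, List.map_map]
    apply List.map_congr_left
    intro k _
    simp only [Function.comp]
    push_cast
    ring
  simp only [hbr]
  have hcuts : (0 :: ((pvFNat w (x :: t)).map (fun j : Nat => (j : Int)) ++ [(((x :: t).length : Nat) : Int)]))
      = (0 :: (pvFNat w (x :: t) ++ [(x :: t).length])).map (fun j : Nat => (j : Int)) := by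
    simp
  rw [hcuts, ← List.map_tail, List.zip_map, List.map_map]
  unfold pvPairsN
  apply List.map_congr_left
  intro p _
  simp only [Function.comp, Prod.map]
  rw [PySem.List.slice_natCast]
  rfl

-- ===== VERDICT (by name: the statement is the Claim_ definition above) =====
theorem split_into_consecutive_sequences_py_spec : Claim_equal_split_into_consecutive_sequences_py := by
  intro source w _ _
  unfold Spec_split_into_consecutive_sequences_py
  cases source with
  | nil => rfl
  | cons x t => rw [pvA_eq, pvB_eq, pvSBmain]
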